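/- GENERATED by mk_final_copies.py from the proof of the farm's unit `vorbis_decode_packet_rest.4c` (farm:vorbis_decode_packet_rest.4c.1: Proof.lean) as the
   re-elaboration sweep compiled it — do not edit. -/
import Asan.CheckWalk
import Vorbis.Spec.Units.vorbis_decode_packet_rest_4c
import Vorbis.Spec.Worked.vorbis_decode_packet_rest_4c_Lemmas

open X86 X86.User Asan Vorbis Vorbis.Spec Vorbis.Spec.vorbis_decode_packet_rest

/-- Segment .4c of `vorbis_decode_packet_rest` (0x110d93 … 0x110cad): the inline DECODE_RAW of the subclass book (the fast-huffman
lookup with `acc >>= n`, `valid_bits -= n`, or the call of codebook_decode_scalar_raw), from `At4c` to `At4d`: lemma `segC` of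
Lemmas.lean. -/
theorem Vorbis.Spec.Worked.vorbis_decode_packet_rest_4c_ok : Vorbis.Spec.vorbis_decode_packet_rest_4c.Statement := by
  intro Lay hLay μ hμ u₀ hcode h_raw hl1 hl8 hl4 hl2
  exact Vorbis.Spec.vorbis_decode_packet_rest_4c.segC hLay hμ hcode h_raw hl1 hl8 hl4 hl2
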